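-- pv_equiv track=rewrite | github.com/jaewhi-park/blog | ui/components/source_input.py | _extract_arxiv_id
-- ===== SOURCE A (Python) =====
-- def _extract_arxiv_id(input_str: str) -> str:
--     """arXiv URL 또는 ID에서 순수 ID를 추출한다."""
--     # URL 패턴 처리
--     for prefix in (
--         "https://arxiv.org/abs/",
--         "http://arxiv.org/abs/",
--         "https://arxiv.org/pdf/",
--         "http://arxiv.org/pdf/",
--     ):
--         if input_str.startswith(prefix):
--             return input_str[len(prefix) :].rstrip("/")
--     return input_str
-- ===== SOURCE B (Python) =====
-- def _extract_arxiv_id(input_str: str) -> str: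
--     """arXiv URL 또는 ID에서 순수 ID를 추출한다."""
--     scheme, sep, rest = input_str.partition("://")
--     if sep and scheme in ("http", "https"):
--         for path_prefix in ("arxiv.org/abs/", "arxiv.org/pdf/"):
--             if rest.startswith(path_prefix):
--                 return rest[len(path_prefix):].rstrip("/")
--     return input_str
-- ===== Notes on version B (the rewrite author's own statement) =====
-- stated objective: idiomatic
-- what changed: Splits the URL once at the scheme separator with str.partition and then validates the scheme and the arxiv.org path segment separately, instead of A's loop over four fully spelled-out URL prefixes.
import Mathlib
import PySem

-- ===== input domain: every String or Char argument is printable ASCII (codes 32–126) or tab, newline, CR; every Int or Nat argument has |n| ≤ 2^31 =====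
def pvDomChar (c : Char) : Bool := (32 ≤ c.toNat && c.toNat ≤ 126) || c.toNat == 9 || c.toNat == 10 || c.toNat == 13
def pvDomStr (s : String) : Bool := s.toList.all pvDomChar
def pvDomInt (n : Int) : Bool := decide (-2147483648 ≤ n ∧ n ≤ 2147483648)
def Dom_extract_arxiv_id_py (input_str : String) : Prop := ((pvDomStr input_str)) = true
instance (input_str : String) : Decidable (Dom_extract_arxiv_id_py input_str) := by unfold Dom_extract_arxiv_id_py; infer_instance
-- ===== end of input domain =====

-- B splits the URL once at the scheme separator (str.partition) and validates scheme and arxiv.org path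
-- segment separately, replacing A's loop over four spelled-out prefixes (objective: idiomatic).

-- exact port of Python's str.rstrip("/") on the code-point list (shared by both ports)
def pvRstripSlash (cs : List Char) : List Char := (cs.reverse.dropWhile (· == '/')).reverse

-- ===== PORT A =====
-- A's loop over the 4-tuple of literal prefixes, unrolled in the same order;
-- input_str[len(prefix):] is List.drop (len prefix), exact for a nonnegative index.
def extract_arxiv_id_py (input_str : String) : String :=
  let cs := input_str.toList
  if PySem.Chars.startswith cs "https://arxiv.org/abs/".toList = true then
    String.ofList (pvRstripSlash (cs.drop 22))
  else if PySem.Chars.startswith cs "http://arxiv.org/abs/".toList = true then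
    String.ofList (pvRstripSlash (cs.drop 21))
  else if PySem.Chars.startswith cs "https://arxiv.org/pdf/".toList = true then
    String.ofList (pvRstripSlash (cs.drop 22))
  else if PySem.Chars.startswith cs "http://arxiv.org/pdf/".toList = true then
    String.ofList (pvRstripSlash (cs.drop 21))
  else input_str

-- ===== PORT B =====
-- Source B: input_str.partition("://") is ported by hand (PySem has no partition): exact,
-- since partition splits at the FIRST occurrence, i.e. at PySem.Chars.find, with
-- scheme = cs.take sep and rest = cs.drop (sep+3); the 'if sep' test is sep ≠ -1.
-- The loop over the two 14-character path prefixes is unrolled in its order; the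
-- slice rest[len(path_prefix):] is List.drop 14, exact for a nonnegative index.
def extract_arxiv_id_py_alt (input_str : String) : String :=
  let cs := input_str.toList
  let sep := PySem.Chars.find cs "://".toList
  if sep ≠ -1 ∧
     (cs.take sep.toNat = "http".toList ∨ cs.take sep.toNat = "https".toList) then
    let rest := cs.drop (sep.toNat + 3)
    if PySem.Chars.startswith rest "arxiv.org/abs/".toList = true then
      String.ofList (pvRstripSlash (rest.drop 14))
    else if PySem.Chars.startswith rest "arxiv.org/pdf/".toList = true then
      String.ofList (pvRstripSlash (rest.drop 14))
    else input_str
  else input_str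

-- ===== PRECONDITION & SPEC =====
def Spec_extract_arxiv_id_py (input_str : String) (out : String) : Prop := out = extract_arxiv_id_py_alt input_str
instance (input_str : String) (out : String) : Decidable (Spec_extract_arxiv_id_py input_str out) := by unfold Spec_extract_arxiv_id_py; infer_instance

-- ===== CLAIM (what is proved, stated in full; the proofs are below) =====
def Claim_equal_extract_arxiv_id_py : Prop := ∀ (input_str : String), Dom_extract_arxiv_id_py input_str → Spec_extract_arxiv_id_py input_str (extract_arxiv_id_py input_str)

-- ===== LEMMAS AND PROOFS =====

-- str.find returns the first occurrence: occurrence at k plus minimality pins the value.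
theorem pv_find_eq (cs sub : List Char) (k : Nat) (hk : sub <+: cs.drop k)
    (hmin : ∀ i, i < k → ¬ sub <+: cs.drop i) : PySem.Chars.find cs sub = k := by
  have hinf : sub <:+: cs := by
    obtain ⟨t, ht⟩ := hk
    exact ⟨cs.take k, t, by rw [List.append_assoc, ht, List.take_append_drop]⟩
  have h0 : 0 ≤ PySem.Chars.find cs sub := (PySem.Chars.find_nonneg_iff cs sub).mpr hinf
  obtain ⟨hpre, hminf⟩ := PySem.Chars.find_spec h0
  rcases lt_trichotomy (PySem.Chars.find cs sub).toNat k with h | h | h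
  · exact absurd hpre (hmin _ h)
  · omega
  · exact absurd hk (hminf k h)

theorem pv_find_https (rest : List Char) :
    PySem.Chars.find ('h'::'t'::'t'::'p'::'s'::':'::'/'::'/'::rest) [':', '/', '/'] = 5 := by
  apply pv_find_eq
  · simp
  · intro i hi
    interval_cases i <;> simp [List.cons_prefix_cons]

theorem pv_find_http (rest : List Char) :
    PySem.Chars.find ('h'::'t'::'t'::'p'::':'::'/'::'/'::rest) [':', '/', '/'] = 4 := by
  apply pv_find_eq
  · simp
  · intro i hi
    interval_cases i <;> simp [List.cons_prefix_cons]

-- a take-equation pins the decomposition of the list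
theorem pv_take_decomp {cs p : List Char} {n : Nat} (h : cs.take n = p) :
    cs = p ++ cs.drop n := by
  conv_lhs => rw [← List.take_append_drop n cs]
  rw [h]

theorem pv_drop_left (p l : List Char) (n : Nat) (h : p.length = n) :
    List.drop n (p ++ l) = l := by subst h; exact List.drop_left

-- the two 14-char path prefixes are incompatible
theorem pv_abs_ne_pdf (b d : List Char)
    (h : "arxiv.org/abs/".toList ++ b = "arxiv.org/pdf/".toList ++ d) : False := by
  have := (List.append_inj h (by decide)).1
  exact absurd this (by decide)

theorem pv_main (s : String) : extract_arxiv_id_py s = extract_arxiv_id_py_alt s := by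
  by_cases h1 : PySem.Chars.startswith s.toList "https://arxiv.org/abs/".toList = true
  · obtain ⟨v, hv⟩ := (PySem.Chars.startswith_iff _ _).mp h1
    simp only [extract_arxiv_id_py, extract_arxiv_id_py_alt, ← hv]
    rw [if_pos ((PySem.Chars.startswith_iff _ _).mpr ⟨v, rfl⟩)]
    have hf : PySem.Chars.find ("https://arxiv.org/abs/".toList ++ v) "://".toList = 5 := by
      rw [show "https://arxiv.org/abs/".toList ++ v
          = 'h'::'t'::'t'::'p'::'s'::':'::'/'::'/'::("arxiv.org/abs/".toList ++ v) from rfl]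
      exact pv_find_https _
    rw [hf,
        if_pos (show ((5:Int) ≠ -1 ∧
          (List.take ((5:Int)).toNat ("https://arxiv.org/abs/".toList ++ v) = "http".toList ∨
           List.take ((5:Int)).toNat ("https://arxiv.org/abs/".toList ++ v) = "https".toList))
          from ⟨by decide, Or.inr rfl⟩),
        if_pos (show PySem.Chars.startswith
            (List.drop (((5:Int)).toNat + 3) ("https://arxiv.org/abs/".toList ++ v))
            "arxiv.org/abs/".toList = true
          from (PySem.Chars.startswith_iff _ _).mpr ⟨v, rfl⟩)]
    rfl
  · by_cases h2 : PySem.Chars.startswith s.toList "http://arxiv.org/abs/".toList = true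
    · obtain ⟨v, hv⟩ := (PySem.Chars.startswith_iff _ _).mp h2
      rw [← hv] at h1
      simp only [extract_arxiv_id_py, extract_arxiv_id_py_alt, ← hv]
      rw [if_neg h1, if_pos ((PySem.Chars.startswith_iff _ _).mpr ⟨v, rfl⟩)]
      have hf : PySem.Chars.find ("http://arxiv.org/abs/".toList ++ v) "://".toList = 4 := by
        rw [show "http://arxiv.org/abs/".toList ++ v
            = 'h'::'t'::'t'::'p'::':'::'/'::'/'::("arxiv.org/abs/".toList ++ v) from rfl]
        exact pv_find_http _
      rw [hf,
          if_pos (show ((4:Int) ≠ -1 ∧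
            (List.take ((4:Int)).toNat ("http://arxiv.org/abs/".toList ++ v) = "http".toList ∨
             List.take ((4:Int)).toNat ("http://arxiv.org/abs/".toList ++ v) = "https".toList))
            from ⟨by decide, Or.inl rfl⟩),
          if_pos (show PySem.Chars.startswith
              (List.drop (((4:Int)).toNat + 3) ("http://arxiv.org/abs/".toList ++ v))
              "arxiv.org/abs/".toList = true
            from (PySem.Chars.startswith_iff _ _).mpr ⟨v, rfl⟩)]
      rfl
    · by_cases h3 : PySem.Chars.startswith s.toList "https://arxiv.org/pdf/".toList = true
      · obtain ⟨v, hv⟩ := (PySem.Chars.startswith_iff _ _).mp h3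
        rw [← hv] at h1 h2
        simp only [extract_arxiv_id_py, extract_arxiv_id_py_alt, ← hv]
        rw [if_neg h1, if_neg h2, if_pos ((PySem.Chars.startswith_iff _ _).mpr ⟨v, rfl⟩)]
        have hf : PySem.Chars.find ("https://arxiv.org/pdf/".toList ++ v) "://".toList = 5 := by
          rw [show "https://arxiv.org/pdf/".toList ++ v
              = 'h'::'t'::'t'::'p'::'s'::':'::'/'::'/'::("arxiv.org/pdf/".toList ++ v) from rfl]
          exact pv_find_https _
        rw [hf,
            if_pos (show ((5:Int) ≠ -1 ∧
              (List.take ((5:Int)).toNat ("https://arxiv.org/pdf/".toList ++ v) = "http".toList ∨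
               List.take ((5:Int)).toNat ("https://arxiv.org/pdf/".toList ++ v) = "https".toList))
              from ⟨by decide, Or.inr rfl⟩),
            if_neg (show ¬ PySem.Chars.startswith
                (List.drop (((5:Int)).toNat + 3) ("https://arxiv.org/pdf/".toList ++ v))
                "arxiv.org/abs/".toList = true from by
              intro h
              obtain ⟨w, hw⟩ := (PySem.Chars.startswith_iff _ _).mp h
              exact pv_abs_ne_pdf w v hw),
            if_pos (show PySem.Chars.startswith
                (List.drop (((5:Int)).toNat + 3) ("https://arxiv.org/pdf/".toList ++ v))
                "arxiv.org/pdf/".toList = true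
              from (PySem.Chars.startswith_iff _ _).mpr ⟨v, rfl⟩)]
        rfl
      · by_cases h4 : PySem.Chars.startswith s.toList "http://arxiv.org/pdf/".toList = true
        · obtain ⟨v, hv⟩ := (PySem.Chars.startswith_iff _ _).mp h4
          rw [← hv] at h1 h2 h3
          simp only [extract_arxiv_id_py, extract_arxiv_id_py_alt, ← hv]
          rw [if_neg h1, if_neg h2, if_neg h3,
              if_pos ((PySem.Chars.startswith_iff _ _).mpr ⟨v, rfl⟩)]
          have hf : PySem.Chars.find ("http://arxiv.org/pdf/".toList ++ v) "://".toList = 4 := by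
            rw [show "http://arxiv.org/pdf/".toList ++ v
                = 'h'::'t'::'t'::'p'::':'::'/'::'/'::("arxiv.org/pdf/".toList ++ v) from rfl]
            exact pv_find_http _
          rw [hf,
              if_pos (show ((4:Int) ≠ -1 ∧
                (List.take ((4:Int)).toNat ("http://arxiv.org/pdf/".toList ++ v) = "http".toList ∨
                 List.take ((4:Int)).toNat ("http://arxiv.org/pdf/".toList ++ v) = "https".toList))
                from ⟨by decide, Or.inl rfl⟩),
              if_neg (show ¬ PySem.Chars.startswith
                  (List.drop (((4:Int)).toNat + 3) ("http://arxiv.org/pdf/".toList ++ v))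
                  "arxiv.org/abs/".toList = true from by
                intro h
                obtain ⟨w, hw⟩ := (PySem.Chars.startswith_iff _ _).mp h
                exact pv_abs_ne_pdf w v hw),
              if_pos (show PySem.Chars.startswith
                  (List.drop (((4:Int)).toNat + 3) ("http://arxiv.org/pdf/".toList ++ v))
                  "arxiv.org/pdf/".toList = true
                from (PySem.Chars.startswith_iff _ _).mpr ⟨v, rfl⟩)]
          rfl
        · -- no prefix matches: B must take its fall-through branch too
          simp only [extract_arxiv_id_py, extract_arxiv_id_py_alt]
          rw [if_neg h1, if_neg h2, if_neg h3, if_neg h4]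
          by_cases hguard : (PySem.Chars.find s.toList "://".toList ≠ -1 ∧
              (s.toList.take (PySem.Chars.find s.toList "://".toList).toNat = "http".toList ∨
               s.toList.take (PySem.Chars.find s.toList "://".toList).toNat = "https".toList))
          · rw [if_pos hguard]
            obtain ⟨hne, hsch⟩ := hguard
            have h0 : 0 ≤ PySem.Chars.find s.toList "://".toList := by
              have := PySem.Chars.neg_one_le_find s.toList "://".toList
              omega
            obtain ⟨hpre, -⟩ := PySem.Chars.find_spec h0
            have hlen3 : (PySem.Chars.find s.toList "://".toList).toNat + 3 ≤ s.toList.length := by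
              have h := hpre.length_le
              rw [List.length_drop] at h
              have h3 : ("://".toList).length = 3 := rfl
              rw [h3] at h
              omega
            -- from the scheme check, find = 4 (http) or 5 (https), and s decomposes
            have hpath : ∀ pfx : List Char, pfx.length = 14 →
                PySem.Chars.startswith
                  (s.toList.drop ((PySem.Chars.find s.toList "://".toList).toNat + 3)) pfx = true →
                (PySem.Chars.startswith s.toList ("http://".toList ++ pfx) = true ∧
                  s.toList.take (PySem.Chars.find s.toList "://".toList).toNat = "http".toList) ∨
                (PySem.Chars.startswith s.toList ("https://".toList ++ pfx) = true ∧
                  s.toList.take (PySem.Chars.find s.toList "://".toList).toNat = "https".toList) := by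
              intro pfx _ h
              obtain ⟨w, hw⟩ := (PySem.Chars.startswith_iff _ _).mp h
              rcases hsch with hs | hs
              · left
                refine ⟨?_, hs⟩
                have h4' : (PySem.Chars.find s.toList "://".toList).toNat = 4 := by
                  have h := congrArg List.length hs
                  rw [List.length_take] at h
                  have hm : min (PySem.Chars.find s.toList "://".toList).toNat s.toList.length = 4 := h
                  omega
                rw [h4'] at hpre hw hs
                obtain ⟨r, hr⟩ := hpre
                have hcs2 : s.toList = "http://".toList ++ r := by
                  have hdec := pv_take_decomp hs
                  rw [← hr] at hdec
                  rw [hdec, ← List.append_assoc]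
                  exact congrArg (· ++ r) (by decide)
                have hdrop : List.drop (4 + 3) s.toList = r := by
                  rw [hcs2]; exact pv_drop_left _ _ _ (by decide)
                rw [hdrop] at hw
                refine (PySem.Chars.startswith_iff _ _).mpr ⟨w, ?_⟩
                rw [hcs2, ← hw, ← List.append_assoc]
              · right
                refine ⟨?_, hs⟩
                have h5' : (PySem.Chars.find s.toList "://".toList).toNat = 5 := by
                  have h := congrArg List.length hs
                  rw [List.length_take] at h
                  have hm : min (PySem.Chars.find s.toList "://".toList).toNat s.toList.length = 5 := h
                  omega
                rw [h5'] at hpre hw hs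
                obtain ⟨r, hr⟩ := hpre
                have hcs2 : s.toList = "https://".toList ++ r := by
                  have hdec := pv_take_decomp hs
                  rw [← hr] at hdec
                  rw [hdec, ← List.append_assoc]
                  exact congrArg (· ++ r) (by decide)
                have hdrop : List.drop (5 + 3) s.toList = r := by
                  rw [hcs2]; exact pv_drop_left _ _ _ (by decide)
                rw [hdrop] at hw
                refine (PySem.Chars.startswith_iff _ _).mpr ⟨w, ?_⟩
                rw [hcs2, ← hw, ← List.append_assoc]
            have habs : ¬ PySem.Chars.startswith
                (s.toList.drop ((PySem.Chars.find s.toList "://".toList).toNat + 3))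
                "arxiv.org/abs/".toList = true := by
              intro h
              rcases hpath "arxiv.org/abs/".toList (by decide) h with ⟨hp, -⟩ | ⟨hp, -⟩
              · exact h2 hp
              · exact h1 hp
            have hpdf : ¬ PySem.Chars.startswith
                (s.toList.drop ((PySem.Chars.find s.toList "://".toList).toNat + 3))
                "arxiv.org/pdf/".toList = true := by
              intro h
              rcases hpath "arxiv.org/pdf/".toList (by decide) h with ⟨hp, -⟩ | ⟨hp, -⟩
              · exact h4 hp
              · exact h3 hp
            rw [if_neg habs, if_neg hpdf]
          · rw [if_neg hguard]

-- ===== VERDICT (by name: the statement is the Claim_ definition above) =====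
theorem extract_arxiv_id_py_spec : Claim_equal_extract_arxiv_id_py := by
  intro s _
  exact pv_main s
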